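-- pv_equiv track=rewrite | github.com/bvick/RubikPhotoSolve | Rcube.py | movesToStandard
-- ===== SOURCE A (Python) =====
-- def movesToStandard(moves):
--     sides="UFRBLD"
--     marks=["","","2","'"]
--     s = ""
--     for i,move in enumerate(moves):
--         s += sides[move[0]]+marks[move[1]]
--         if i%5==4: s+=" "
--     return(s)
-- ===== SOURCE B (Python) =====
-- def movesToStandard(moves):
--     # chunked: peel off groups of five moves, render each group at once,
--     # append the trailing space only after full groups
--     sides = "UFRBLD"
--     marks = ["", "", "2", "'"]
--     parts = []
--     rest = moves
--     while rest:
--         chunk, rest = rest[:5], rest[5:]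
--         parts.append("".join(sides[a] + marks[b] for a, b in chunk))
--         if len(chunk) == 5:
--             parts.append(" ")
--     return "".join(parts)
-- ===== Notes on version B (the rewrite author's own statement) =====
-- stated objective: alternative
-- what changed: A appends move-by-move with an enumerate index and a mod-5 test; B peels the move list into chunks of five, renders each chunk with a join and appends the group separator once per full chunk.
import Mathlib
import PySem

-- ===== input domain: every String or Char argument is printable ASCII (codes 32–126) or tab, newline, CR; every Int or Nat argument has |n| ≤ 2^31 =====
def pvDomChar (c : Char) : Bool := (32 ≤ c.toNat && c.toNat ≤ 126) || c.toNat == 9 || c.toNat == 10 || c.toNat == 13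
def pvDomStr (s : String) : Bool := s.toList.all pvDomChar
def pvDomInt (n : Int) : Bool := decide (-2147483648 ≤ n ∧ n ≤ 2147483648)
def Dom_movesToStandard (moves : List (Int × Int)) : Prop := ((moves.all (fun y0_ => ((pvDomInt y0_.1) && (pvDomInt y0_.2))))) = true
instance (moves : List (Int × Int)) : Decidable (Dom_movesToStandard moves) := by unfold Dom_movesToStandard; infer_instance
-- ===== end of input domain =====

-- B restructures A's per-move loop (enumerate index, mod-5 space test) into a chunks-of-five loop:
-- render each chunk with a join, emit the space once per full chunk. Alternative decomposition, same cost.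

-- ===== PORT A =====
-- strings are handled as List Char (PySem.Chars convention); pyGetD is exact under Pre_ (index in range)
def stepA (s : List Char) (p : Int × (Int × Int)) : List Char :=
  if PySem.Int.mod p.1 5 == 4
  then s ++ (PySem.List.pyGetD "UFRBLD".toList p.2.1 ' ' ::
             PySem.List.pyGetD ([[], [], ['2'], ['\'']] : List (List Char)) p.2.2 []) ++ [' ']
  else s ++ (PySem.List.pyGetD "UFRBLD".toList p.2.1 ' ' ::
             PySem.List.pyGetD ([[], [], ['2'], ['\'']] : List (List Char)) p.2.2 [])

def movesToStandard (moves : List (Int × Int)) : String :=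
  String.ofList ((PySem.List.enumerate moves 0).foldl stepA [])

-- ===== PORT B =====
-- sides[a] + marks[b] for one move
def pieceB (m : Int × Int) : List Char :=
  PySem.List.pyGetD "UFRBLD".toList m.1 ' ' ::
  PySem.List.pyGetD ([[], [], ['2'], ['\'']] : List (List Char)) m.2 []

-- "".join(sides[a]+marks[b] for a,b in chunk)
def chunkChars (chunk : List (Int × Int)) : List Char := (chunk.map pieceB).flatten

-- the while loop: peel off rest[:5], append its rendering (and a space if it is full), continue on rest[5:]
def altLoop (ms : List (Int × Int)) (parts : List (List Char)) : List (List Char) :=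
  if ms = [] then parts
  else
    altLoop (PySem.List.slice ms (some 5) none)
      (if (PySem.List.slice ms none (some 5)).length == 5
       then parts ++ [chunkChars (PySem.List.slice ms none (some 5))] ++ [[' ']]
       else parts ++ [chunkChars (PySem.List.slice ms none (some 5))])
termination_by ms.length
decreasing_by
  cases ms with
  | nil => simp_all
  | cons x rest => simp [PySem.List.slice_some_none, PySem.List.clampIdx]

def movesToStandard_alt (moves : List (Int × Int)) : String :=
  String.ofList (altLoop moves []).flatten

-- ===== PRECONDITION & SPEC =====
-- Pre_ excludes exactly the inputs on which Python A raises IndexError: a move whose side index is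
-- outside [-6,6) or whose mark index is outside [-4,4).
def Pre_movesToStandard (moves : List (Int × Int)) : Prop :=
  ∀ m ∈ moves, PySem.Raise.InRange 6 m.1 ∧ PySem.Raise.InRange 4 m.2
instance (moves : List (Int × Int)) : Decidable (Pre_movesToStandard moves) := by
  unfold Pre_movesToStandard; infer_instance

def pvWitness_movesToStandard : (List (Int × Int)) :=
  [(0, 0), (1, 2), (5, 3), (2, 1), (3, 0), (4, 3), (-1, -2)]

def Spec_movesToStandard (moves : List (Int × Int)) (out : String) : Prop := out = movesToStandard_alt moves
instance (moves : List (Int × Int)) (out : String) : Decidable (Spec_movesToStandard moves out) := by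
  unfold Spec_movesToStandard; infer_instance

-- ===== CLAIM (what is proved, stated in full; the proofs are below) =====
def Claim_equal_movesToStandard : Prop := ∀ (moves : List (Int × Int)), Dom_movesToStandard moves → Pre_movesToStandard moves → Spec_movesToStandard moves (movesToStandard moves)

-- ===== LEMMAS AND PROOFS =====

-- altLoop only appends to its accumulator
theorem altLoop_acc (xs : List (Int × Int)) (parts : List (List Char)) :
    (altLoop xs parts).flatten = parts.flatten ++ (altLoop xs []).flatten := by
  by_cases h : xs = []
  · simp [altLoop, h]
  · conv_lhs => rw [altLoop]
    conv_rhs => rw [altLoop]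
    rw [if_neg h, if_neg h]
    simp only [List.nil_append]
    rw [altLoop_acc (PySem.List.slice xs (some 5) none),
        altLoop_acc (PySem.List.slice xs (some 5) none)
          (if (PySem.List.slice xs none (some 5)).length == 5
           then [chunkChars (PySem.List.slice xs none (some 5))] ++ [[' ']]
           else [chunkChars (PySem.List.slice xs none (some 5))])]
    split_ifs <;> simp [List.append_assoc]
termination_by xs.length
decreasing_by all_goals
  cases xs with
  | nil => simp_all
  | cons x rest => simp [PySem.List.slice_some_none, PySem.List.clampIdx]

-- A's enumerate loop, started at any multiple of 5, produces B's chunked output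
theorem loopA_eq (xs : List (Int × Int)) (s : Int) (acc : List Char)
    (h0 : 0 ≤ s) (h5 : s % 5 = 0) :
    (PySem.List.enumerate xs s).foldl stepA acc = acc ++ (altLoop xs []).flatten := by
  have hm : ∀ t : Int, PySem.Int.mod t 5 = t % 5 := fun t =>
    PySem.Int.mod_eq_emod_of_pos (by omega)
  have n0 : ¬ (s % 5 = 4) := by omega
  have n1 : ¬ ((s + 1) % 5 = 4) := by omega
  have n2 : ¬ ((s + 1 + 1) % 5 = 4) := by omega
  have n3 : ¬ ((s + 1 + 1 + 1) % 5 = 4) := by omega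
  have y4 : (s + 1 + 1 + 1 + 1) % 5 = 4 := by omega
  match xs with
  | [] => simp [altLoop]
  | [a] =>
    simp [PySem.List.enumerate_cons, stepA, n0, altLoop, PySem.List.slice,
          PySem.List.clampIdx, chunkChars, pieceB]
  | [a, b] =>
    simp [PySem.List.enumerate_cons, stepA, n0, n1, altLoop, PySem.List.slice,
          PySem.List.clampIdx, chunkChars, pieceB]
  | [a, b, c] =>
    simp [PySem.List.enumerate_cons, stepA, n0, n1, n2, altLoop, PySem.List.slice,
          PySem.List.clampIdx, chunkChars, pieceB]
  | [a, b, c, d] =>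
    simp [PySem.List.enumerate_cons, stepA, n0, n1, n2, n3, altLoop, PySem.List.slice,
          PySem.List.clampIdx, chunkChars, pieceB]
  | a :: b :: c :: d :: e :: rest =>
    have ih := loopA_eq rest (s + 1 + 1 + 1 + 1 + 1)
      (acc ++ pieceB a ++ pieceB b ++ pieceB c ++ pieceB d ++ pieceB e ++ [' '])
      (by omega) (by omega)
    have hsl5 : PySem.List.slice (a :: b :: c :: d :: e :: rest) none (some 5) =
        [a, b, c, d, e] := by
      simp [PySem.List.slice, PySem.List.clampIdx]
    have hslr : PySem.List.slice (a :: b :: c :: d :: e :: rest) (some 5) none = rest := by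
      simp [PySem.List.slice_some_none, PySem.List.clampIdx]
    rw [altLoop, if_neg (by simp), hsl5, hslr, if_pos (by rfl)]
    rw [altLoop_acc]
    simp only [pieceB] at ih
    simp [stepA, n0, n1, n2, n3, y4, chunkChars, pieceB, List.append_assoc]
    simp [List.append_assoc] at ih
    exact ih
termination_by xs.length
decreasing_by all_goals simp; omega

-- ===== VERDICT (by name: the statement is the Claim_ definition above) =====
theorem movesToStandard_spec : Claim_equal_movesToStandard := by
  intro moves _ _
  unfold Spec_movesToStandard movesToStandard movesToStandard_alt
  rw [loopA_eq moves 0 [] (by omega) (by omega)]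
  simp
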